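-- pv_equiv track=rewrite | github.com/suleymantaha/godtier-shorts | backend/services/subtitle_renderer.py | _join_word_fragments
-- ===== SOURCE A (Python) =====
-- def _join_word_fragments(word_fragments: list[str]) -> str:
--     rendered: list[str] = []
--     for fragment in word_fragments:
--         if not fragment:
--             continue
--         if fragment == r"\N":
--             rendered.append(fragment)
--             continue
--         if rendered and rendered[-1] != r"\N":
--             rendered.append(" ")
--         rendered.append(fragment)
--     return "".join(rendered)
-- ===== SOURCE B (Python) =====
-- def _join_word_fragments(word_fragments: list[str]) -> str:
--     segments: list[str] = []
--     current: list[str] = []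
--     for fragment in word_fragments:
--         if not fragment:
--             continue
--         if fragment == r"\N":
--             segments.append(" ".join(current))
--             segments.append(r"\N")
--             current = []
--         else:
--             current.append(fragment)
--     segments.append(" ".join(current))
--     return "".join(segments)
-- ===== Notes on version B (the rewrite author's own statement) =====
-- stated objective: idiomatic
-- what changed: Instead of A's last-element inspection of a growing rendered list to decide space insertion, B accumulates each run of words in a buffer, flushes it with ' '.join at every newline marker and at the end, and concatenates the flushed segments.
import Mathlib
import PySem

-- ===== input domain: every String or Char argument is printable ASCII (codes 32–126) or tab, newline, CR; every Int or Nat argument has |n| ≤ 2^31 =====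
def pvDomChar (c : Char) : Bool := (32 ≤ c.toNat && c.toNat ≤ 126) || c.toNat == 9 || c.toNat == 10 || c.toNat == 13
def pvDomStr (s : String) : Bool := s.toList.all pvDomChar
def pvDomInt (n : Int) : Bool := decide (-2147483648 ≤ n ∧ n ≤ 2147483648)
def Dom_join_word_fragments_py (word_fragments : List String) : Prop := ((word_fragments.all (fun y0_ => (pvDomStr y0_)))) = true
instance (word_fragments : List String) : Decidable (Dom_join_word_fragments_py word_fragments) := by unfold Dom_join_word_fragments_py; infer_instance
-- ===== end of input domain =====

-- B replaces A's last-element inspection of the growing rendered list by a run buffer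
-- flushed with " ".join at each newline marker and at the end (idiomatic decomposition;
-- same cost; return value only, no mutation involved).

-- ===== PORT A =====
-- one loop iteration of A: skip empty, keep the marker, else maybe a space, then the word
def pvAStep (rendered : List String) (fragment : String) : List String :=
  if fragment = "" then rendered
  else if fragment = "\\N" then rendered ++ [fragment]
  else
    let rendered := if rendered ≠ [] ∧ rendered.getLast? ≠ some "\\N" then rendered ++ [" "] else rendered
    rendered ++ [fragment]

def join_word_fragments_py (word_fragments : List String) : String :=
  PySem.Str.join "" (word_fragments.foldl pvAStep [])

-- ===== PORT B =====
-- one loop iteration of B over (segments, current)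
def pvBStep (st : List String × List String) (fragment : String) : List String × List String :=
  if fragment = "" then st
  else if fragment = "\\N" then (st.1 ++ [PySem.Str.join " " st.2, "\\N"], [])
  else (st.1, st.2 ++ [fragment])

def join_word_fragments_py_alt (word_fragments : List String) : String :=
  let st := word_fragments.foldl pvBStep ([], [])
  PySem.Str.join "" (st.1 ++ [PySem.Str.join " " st.2])

-- ===== PRECONDITION & SPEC =====
def Spec_join_word_fragments_py (word_fragments : List String) (out : String) : Prop := out = join_word_fragments_py_alt word_fragments
instance (word_fragments : List String) (out : String) : Decidable (Spec_join_word_fragments_py word_fragments out) := by unfold Spec_join_word_fragments_py; infer_instance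

-- ===== CLAIM (what is proved, stated in full; the proofs are below) =====
def Claim_equal_join_word_fragments_py : Prop := ∀ (word_fragments : List String), Dom_join_word_fragments_py word_fragments → Spec_join_word_fragments_py word_fragments (join_word_fragments_py word_fragments)

-- ===== LEMMAS AND PROOFS =====

-- concatenation of the character contents of a list of strings
def pvFlat (xs : List String) : List Char := (xs.map String.toList).flatten

lemma pvFlat_append (xs ys : List String) : pvFlat (xs ++ ys) = pvFlat xs ++ pvFlat ys := by
  simp [pvFlat]

lemma chars_join_nilsep (ps : List (List Char)) : PySem.Chars.join [] ps = ps.flatten := by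
  induction ps with
  | nil => simp [PySem.Chars.join_nil]
  | cons p rest ih =>
    cases rest with
    | nil => simp [PySem.Chars.join_singleton]
    | cons q r => simp [PySem.Chars.join_cons_cons, ih]

lemma str_join_empty (xs : List String) : PySem.Str.join "" xs = String.ofList (pvFlat xs) := by
  simp [PySem.Str.join, chars_join_nilsep, pvFlat]

lemma chars_join_append_singleton (s p : List Char) (ps : List (List Char)) (h : ps ≠ []) :
    PySem.Chars.join s (ps ++ [p]) = PySem.Chars.join s ps ++ s ++ p := by
  induction ps with
  | nil => exact absurd rfl h
  | cons q rest ih =>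
    cases rest with
    | nil => simp [PySem.Chars.join_singleton, PySem.Chars.join_cons_cons]
    | cons r t =>
      have h2 := ih (by simp)
      simp only [List.cons_append, PySem.Chars.join_cons_cons]
      simpa [List.append_assoc] using h2

-- the B-side accumulated characters: segments plus the pending " ".join(current)
def pvBFlat (st : List String × List String) : List Char :=
  pvFlat st.1 ++ PySem.Chars.join [' '] (st.2.map String.toList)

-- loop invariant: A's rendered characters equal B's accumulated characters, and
-- current is empty exactly when rendered is empty or ends with the marker
lemma pvLoop (frags : List String) :
    ∀ (rendered segs cur : List String),
    pvFlat rendered = pvBFlat (segs, cur) →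
    (cur = [] ↔ (rendered = [] ∨ rendered.getLast? = some "\\N")) →
    pvFlat (frags.foldl pvAStep rendered) = pvBFlat (frags.foldl pvBStep (segs, cur)) := by
  induction frags with
  | nil => intro rendered segs cur h _; simpa using h
  | cons f rest ih =>
    intro rendered segs cur h hcur
    simp only [List.foldl_cons]
    by_cases hf0 : f = ""
    · simp only [pvAStep, pvBStep, hf0]
      exact ih rendered segs cur h hcur
    · by_cases hfN : f = "\\N"
      · simp only [pvAStep, pvBStep, hfN]
        apply ih
        · simp only [pvBFlat, pvFlat_append]
          simp [pvBFlat, pvFlat, PySem.Str.join, PySem.Chars.join_nil] at h ⊢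
          simp [h]
        · simp
      · simp only [pvAStep, pvBStep, if_neg hf0, if_neg hfN]
        by_cases hcne : cur = []
        · -- current empty: A appends no space
          have hr : rendered = [] ∨ rendered.getLast? = some "\\N" := hcur.mp hcne
          have hnosp : ¬ (rendered ≠ [] ∧ rendered.getLast? ≠ some "\\N") := by
            rcases hr with h1 | h1 <;> simp [h1]
          simp only [if_neg hnosp, hcne]
          apply ih
          · simp only [pvBFlat, pvFlat_append] at h ⊢
            simp only [hcne] at h
            simp [PySem.Chars.join_nil, PySem.Chars.join_singleton] at h ⊢
            simpa [pvFlat] using h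
          · constructor
            · intro hc; simp at hc
            · intro hor
              rcases hor with h1 | h1
              · simp at h1
              · have : f = "\\N" := by simpa using h1
                exact (hfN this).elim
        · -- current nonempty: A appends a space first
          have hrne : rendered ≠ [] ∧ rendered.getLast? ≠ some "\\N" := by
            by_contra hco
            exact hcne (hcur.mpr (by tauto))
          simp only [if_pos hrne]
          apply ih
          · simp only [pvBFlat, pvFlat_append] at h ⊢
            rw [show (cur ++ [f]).map String.toList = cur.map String.toList ++ [f.toList] by simp,
              chars_join_append_singleton _ _ _ (by simpa using hcne)]
            simp only [h, List.append_assoc]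
            simp [pvFlat]
          · constructor
            · intro hc; simp at hc
            · intro hor
              rcases hor with h1 | h1
              · simp at h1
              · have : f = "\\N" := by simpa using h1
                exact (hfN this).elim

theorem pv_main (word_fragments : List String) :
    join_word_fragments_py word_fragments = join_word_fragments_py_alt word_fragments := by
  have h := pvLoop word_fragments [] [] [] (by simp [pvFlat, pvBFlat, PySem.Chars.join_nil]) (by simp)
  simp only [join_word_fragments_py, join_word_fragments_py_alt, str_join_empty]
  congr 1
  rw [h]
  rcases word_fragments.foldl pvBStep ([], []) with ⟨segs, cur⟩
  simp [pvBFlat, pvFlat, PySem.Str.join]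

-- ===== VERDICT (by name: the statement is the Claim_ definition above) =====
theorem join_word_fragments_py_spec : Claim_equal_join_word_fragments_py := by
  intro wf _
  unfold Spec_join_word_fragments_py
  exact pv_main wf
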